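-- pv_equiv track=rewrite | github.com/NBTrong/data-tool-queue | src/utils/utils.py | get_value_from_query
-- ===== SOURCE A (Python) =====
-- def get_value_from_query(query, field):
--     # Tách các cặp key-value trong query bằng phương thức split('&')
--     pairs = query.split('&')
--
--     # Kiểm tra và loại bỏ các phần tử rỗng sau khi phân tách query
--     pairs = [pair for pair in pairs if pair]
--
--     # Tìm cặp key-value chứa trường field và trả về giá trị của trường đó
--     for pair in pairs:
--         key_value = pair.split('=', 1)  # Phân tách thành tối đa một cặp
--         if len(key_value) == 2 and key_value[0] == field:
--             return key_value[1]
--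
--     # Nếu không tìm thấy trường field trong query, trả về None
--     return None
-- ===== SOURCE B (Python) =====
-- def get_value_from_query(query, field):
--     table = {}
--     for pair in query.split('&'):
--         if not pair:
--             continue
--         key_value = pair.split('=', 1)
--         if len(key_value) == 2:
--             table.setdefault(key_value[0], key_value[1])
--     return table.get(field)
-- ===== Notes on version B (the rewrite author's own statement) =====
-- stated objective: idiomatic
-- what changed: Replaces A's scan-with-early-return by a single pass that builds a dict of first occurrences via setdefault, followed by one dict.get lookup.
import Mathlib
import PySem

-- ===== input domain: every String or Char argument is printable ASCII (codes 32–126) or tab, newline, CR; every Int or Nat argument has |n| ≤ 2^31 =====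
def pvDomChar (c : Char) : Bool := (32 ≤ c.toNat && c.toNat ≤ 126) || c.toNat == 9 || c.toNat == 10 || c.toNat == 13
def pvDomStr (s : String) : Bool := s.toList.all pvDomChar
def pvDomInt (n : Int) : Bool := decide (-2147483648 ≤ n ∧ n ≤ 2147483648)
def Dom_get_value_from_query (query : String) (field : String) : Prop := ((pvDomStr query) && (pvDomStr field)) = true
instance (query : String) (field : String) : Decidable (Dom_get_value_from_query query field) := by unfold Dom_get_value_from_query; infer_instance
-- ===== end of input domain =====

-- B builds a first-occurrence dict with setdefault and does one lookup instead of A's scan with early return (idiomatic; same cost).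

-- ===== PORT A =====
-- the for-loop with early return, over the already-filtered pairs
def pvLoopA (field : String) : List String → Option String
  | [] => none
  | p :: rest =>
    let kv := (PySem.Str.splitMax? p "=" 1).getD []
    if kv.length = 2 ∧ kv[0]! = field then some kv[1]! else pvLoopA field rest

def get_value_from_query (query : String) (field : String) : Option String :=
  let pairs := (PySem.Str.split? query "&").getD []  -- "&" ≠ "" so split? is always some
  let pairs := pairs.filter (fun pair => pair ≠ "")
  pvLoopA field pairs

-- ===== PORT B =====
-- one step of B's loop body: skip empties, setdefault on a well-formed pair
def pvStepB (d : PySem.Dict String String) (pair : String) : PySem.Dict String String :=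
  if pair = "" then d
  else
    let kv := (PySem.Str.splitMax? pair "=" 1).getD []
    if kv.length = 2 then d.setdefault kv[0]! kv[1]! else d

def get_value_from_query_alt (query : String) (field : String) : Option String :=
  let pairs := (PySem.Str.split? query "&").getD []
  (pairs.foldl pvStepB PySem.Dict.empty).get? field

-- ===== PRECONDITION & SPEC =====
def Spec_get_value_from_query (query : String) (field : String) (out : Option String) : Prop := out = get_value_from_query_alt query field
instance (query : String) (field : String) (out : Option String) : Decidable (Spec_get_value_from_query query field out) := by unfold Spec_get_value_from_query; infer_instance

-- ===== CLAIM (what is proved, stated in full; the proofs are below) =====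
def Claim_equal_get_value_from_query : Prop := ∀ (query : String) (field : String), Dom_get_value_from_query query field → Spec_get_value_from_query query field (get_value_from_query query field)

-- ===== LEMMAS AND PROOFS =====

-- loop invariant: looking up `field` in the dict built by B's fold equals the value already
-- stored in the accumulator, or else A's first-match scan over the remaining (filtered) pairs
theorem pvLoopA_cons (field p : String) (l : List String) :
    pvLoopA field (p :: l) =
      (if ((PySem.Str.splitMax? p "=" 1).getD []).length = 2 ∧
          ((PySem.Str.splitMax? p "=" 1).getD [])[0]! = field
       then some ((PySem.Str.splitMax? p "=" 1).getD [])[1]!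
       else pvLoopA field l) := rfl

theorem pv_fold_get (field : String) (pairs : List String) (d : PySem.Dict String String) :
    (pairs.foldl pvStepB d).get? field =
      match d.get? field with
      | some v => some v
      | none => pvLoopA field (pairs.filter (fun pair => pair ≠ "")) := by
  induction pairs generalizing d with
  | nil =>
    simp [pvLoopA]
    cases d.get? field <;> rfl
  | cons p rest ih =>
    simp only [List.foldl_cons]
    by_cases hp : p = ""
    · simp [pvStepB, hp, ih]
    · rw [List.filter_cons_of_pos (by simp [hp]), pvLoopA_cons]
      simp only [pvStepB, if_neg hp]
      by_cases hlen : ((PySem.Str.splitMax? p "=" 1).getD []).length = 2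
      · simp only [if_pos hlen]
        by_cases hc : d.contains ((PySem.Str.splitMax? p "=" 1).getD [])[0]! = true
        · rw [PySem.Dict.setdefault_of_contains _ _ hc, ih]
          rw [PySem.Dict.contains_eq_isSome_get?] at hc
          by_cases hk : ((PySem.Str.splitMax? p "=" 1).getD [])[0]! = field
          · rw [if_pos ⟨hlen, hk⟩, ← hk]
            cases h : d.get? ((PySem.Str.splitMax? p "=" 1).getD [])[0]! with
            | none => rw [h] at hc; simp at hc
            | some v => rfl
          · rw [if_neg (fun hand => hk hand.2)]
        · rw [PySem.Dict.setdefault_of_not_contains _ _ (by simpa using hc), ih]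
          rw [PySem.Dict.contains_eq_isSome_get?] at hc
          by_cases hk : ((PySem.Str.splitMax? p "=" 1).getD [])[0]! = field
          · rw [← hk, PySem.Dict.get?_insert_self]
            cases h : d.get? ((PySem.Str.splitMax? p "=" 1).getD [])[0]! with
            | none => rw [if_pos ⟨hlen, rfl⟩]
            | some v => rw [h] at hc; simp at hc
          · rw [PySem.Dict.get?_insert_of_ne _ _ (fun h => hk h.symm),
                if_neg (fun hand => hk hand.2)]
      · rw [if_neg hlen, if_neg (fun hand => hlen hand.1), ih]

-- ===== VERDICT (by name: the statement is the Claim_ definition above) =====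
theorem get_value_from_query_spec : Claim_equal_get_value_from_query := by
  intro query field _
  unfold Spec_get_value_from_query get_value_from_query get_value_from_query_alt
  rw [pv_fold_get]
  simp [PySem.Dict.get?_empty]
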